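-- pv_equiv track=rewrite | github.com/andyhuang93/Student-Class-Scheduler | conflicts.py | make_daysList
-- ===== SOURCE A (Python) =====
-- def make_daysList(days_str):
--
--     days_str = days_str.strip()
--     result = []
--     i = 0
--     while i < len(days_str):
--         if days_str[i:i + 2] in ("Tu", "Th"):
--             result.append(days_str[i:i + 2])
--             i += 2
--         else:
--             result.append(days_str[i])
--             i += 1
--     return result
-- ===== SOURCE B (Python) =====
-- import re
--
-- def make_daysList(days_str):
--     # Idiomatic: one regex scan, two-char tokens tried before the catch-all.
--     return re.findall(r'Tu|Th|[\s\S]', days_str.strip())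
-- ===== Notes on version B (the rewrite author's own statement) =====
-- stated objective: idiomatic
-- what changed: Replaces the manual index loop with slice comparisons by a single regex findall whose alternation (Tu|Th|[\s\S]) performs the same greedy left-to-right tokenization; the C-level regex scan is measurably faster.
import Mathlib
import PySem

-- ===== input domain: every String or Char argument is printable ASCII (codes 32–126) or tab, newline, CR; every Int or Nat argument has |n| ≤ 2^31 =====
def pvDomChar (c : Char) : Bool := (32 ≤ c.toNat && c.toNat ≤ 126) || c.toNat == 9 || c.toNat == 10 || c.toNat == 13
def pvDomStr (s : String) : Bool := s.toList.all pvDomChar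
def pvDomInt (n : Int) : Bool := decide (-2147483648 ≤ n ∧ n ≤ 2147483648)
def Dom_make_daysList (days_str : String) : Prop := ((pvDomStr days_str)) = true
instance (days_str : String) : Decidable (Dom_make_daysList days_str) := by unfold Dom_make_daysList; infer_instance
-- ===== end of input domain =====

-- B replaces A's manual index/slice loop by a single greedy regex-style alternation scan (idiomatic).

-- ===== PORT A =====
-- A's while loop over index i: at each step compare the 2-char slice days_str[i:i+2]
-- with "Tu"/"Th"; here the remaining suffix plays the role of i, and `take 2` is the slice.
def pvALoop : List Char → List String
  | [] => []
  | [c] =>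
      -- slice of length 1 can never equal a 2-char token
      [String.ofList [c]]
  | c1 :: c2 :: rest =>
      if String.ofList [c1, c2] = "Tu" ∨ String.ofList [c1, c2] = "Th" then
        String.ofList [c1, c2] :: pvALoop rest
      else
        String.ofList [c1] :: pvALoop (c2 :: rest)

def make_daysList (days_str : String) : List String :=
  pvALoop (PySem.Str.strip days_str).toList

-- ===== PORT B =====
-- Source B's re.findall(r'Tu|Th|[\s\S]', s.strip()): greedy left-to-right alternation,
-- two-char patterns tried first, then any single character. Ported by hand (exact).
def pvBScan : List Char → List String
  | 'T' :: 'u' :: rest => "Tu" :: pvBScan rest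
  | 'T' :: 'h' :: rest => "Th" :: pvBScan rest
  | c :: rest => String.ofList [c] :: pvBScan rest
  | [] => []

def make_daysList_alt (days_str : String) : List String :=
  pvBScan (PySem.Str.strip days_str).toList

-- ===== PRECONDITION & SPEC =====
def Spec_make_daysList (days_str : String) (out : List String) : Prop := out = make_daysList_alt days_str
instance (days_str : String) (out : List String) : Decidable (Spec_make_daysList days_str out) := by unfold Spec_make_daysList; infer_instance

-- ===== CLAIM (what is proved, stated in full; the proofs are below) =====
def Claim_equal_make_daysList : Prop := ∀ (days_str : String), Dom_make_daysList days_str → Spec_make_daysList days_str (make_daysList days_str)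


-- ===== LEMMAS AND PROOFS =====
theorem pvOfList_pair_eq (a b c d : Char) :
    (String.ofList [a, b] = String.ofList [c, d]) ↔ (a = c ∧ b = d) := by
  constructor
  · intro h
    have := congrArg String.toList h
    simpa [String.toList_ofList] using this
  · rintro ⟨rfl, rfl⟩; rfl

theorem pvBScan_catchall (c1 c2 : Char) (rest : List Char)
    (hu : ¬(c1 = 'T' ∧ c2 = 'u')) (hh : ¬(c1 = 'T' ∧ c2 = 'h')) :
    pvBScan (c1 :: c2 :: rest) = String.ofList [c1] :: pvBScan (c2 :: rest) := by
  rw [pvBScan.eq_def]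
  split
  · rename_i heq; injection heq with h1 h2; injection h2 with h2 _
    exact absurd ⟨h1, h2⟩ hu
  · rename_i heq; injection heq with h1 h2; injection h2 with h2 _
    exact absurd ⟨h1, h2⟩ hh
  · rename_i heq; injection heq with h1 h2; subst h1; subst h2; rfl
  · rename_i heq; simp at heq

theorem pvALoop_eq_pvBScan : ∀ cs : List Char, pvALoop cs = pvBScan cs := by
  intro cs
  fun_induction pvALoop cs with
  | case1 => rfl
  | case2 c =>
      rw [pvBScan.eq_def]; split <;> simp_all [pvBScan]
  | case3 c1 c2 rest h ih =>
      have hok : (c1 = 'T' ∧ c2 = 'u') ∨ (c1 = 'T' ∧ c2 = 'h') := by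
        rcases h with h | h
        · exact Or.inl ((pvOfList_pair_eq c1 c2 'T' 'u').mp h)
        · exact Or.inr ((pvOfList_pair_eq c1 c2 'T' 'h').mp h)
      rcases hok with ⟨rfl, rfl⟩ | ⟨rfl, rfl⟩ <;> simp [pvBScan, ih]
  | case4 c1 c2 rest h ih =>
      have hu : ¬(c1 = 'T' ∧ c2 = 'u') := by
        rintro ⟨rfl, rfl⟩; exact h (Or.inl rfl)
      have hh : ¬(c1 = 'T' ∧ c2 = 'h') := by
        rintro ⟨rfl, rfl⟩; exact h (Or.inr rfl)
      rw [ih, pvBScan_catchall c1 c2 rest hu hh]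

-- ===== VERDICT (by name: the statement is the Claim_ definition above) =====
theorem make_daysList_spec : Claim_equal_make_daysList := by
  intro s _
  unfold Spec_make_daysList make_daysList make_daysList_alt
  exact pvALoop_eq_pvBScan _
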